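-- pv_equiv track=rewrite | github.com/AltoPelago/aeon | implementations/python/src/aeon/core.py | has_valid_radix_literal
-- ===== SOURCE A (Python) =====
-- def is_valid_radix_digit(char: str) -> bool:
--     return char.isalnum() or char in {"&", "!"}
--
-- def has_valid_radix_literal(raw: str) -> bool:
--     body = raw[1:] if raw else ""
--     if not body:
--         return False
--     index = 1 if body[0] in {"+", "-"} else 0
--     if index >= len(body):
--         return False
--     saw_digit = False
--     saw_decimal = False
--     prev_was_digit = False
--     while index < len(body):
--         char = body[index]
--         if is_valid_radix_digit(char):
--             saw_digit = True
--             prev_was_digit = True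
--         elif char == "_":
--             if not prev_was_digit or index + 1 >= len(body) or not is_valid_radix_digit(body[index + 1]):
--                 return False
--             prev_was_digit = False
--         elif char == ".":
--             if saw_decimal or not prev_was_digit or index + 1 >= len(body) or not is_valid_radix_digit(body[index + 1]):
--                 return False
--             saw_decimal = True
--             prev_was_digit = False
--         else:
--             return False
--         index += 1
--     return saw_digit and prev_was_digit
-- ===== SOURCE B (Python) =====
-- def is_valid_radix_digit(char: str) -> bool:
--     return char.isalnum() or char in {"&", "!"}
--
-- def has_valid_radix_literal(raw: str) -> bool:
--     body = raw[1:]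
--     if not body:
--         return False
--     rest = body[1:] if body[0] in {"+", "-"} else body
--     if not rest:
--         return False
--     parts = rest.split(".")
--     if len(parts) > 2:
--         return False
--     return all(
--         group and all(is_valid_radix_digit(c) for c in group)
--         for part in parts
--         for group in part.split("_")
--     )
-- ===== Notes on version B (the rewrite author's own statement) =====
-- stated objective: simpler
-- what changed: Replaced A's char-by-char state machine (saw_digit/saw_decimal/prev_was_digit flags with one-char lookahead) by a declarative decomposition: split the sign-stripped body at the decimal point (at most two parts), split each part at underscores, and require every group to be nonempty and consist of valid radix digits.
import Mathlib
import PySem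

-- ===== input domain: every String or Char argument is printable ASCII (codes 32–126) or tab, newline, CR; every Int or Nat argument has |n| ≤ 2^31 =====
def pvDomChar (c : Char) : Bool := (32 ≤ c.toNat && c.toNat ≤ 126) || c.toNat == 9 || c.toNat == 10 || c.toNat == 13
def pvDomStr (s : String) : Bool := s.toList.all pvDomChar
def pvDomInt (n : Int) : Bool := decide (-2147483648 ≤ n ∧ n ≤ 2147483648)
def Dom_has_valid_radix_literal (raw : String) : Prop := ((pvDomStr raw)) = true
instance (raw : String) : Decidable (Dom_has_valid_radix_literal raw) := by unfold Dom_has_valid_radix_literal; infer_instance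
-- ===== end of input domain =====

-- B replaces A's char-by-char state machine (saw_digit/saw_decimal/prev_was_digit with lookahead)
-- by splitting on '.' and '_' and checking each group is nonempty and all valid digits (objective: simpler).

-- ===== PORT A =====
def isValidRadixDigit (c : Char) : Bool := PySem.Chars.isalnum c || c = '&' || c = '!'

-- the while-loop of A: iterates over the remaining chars, with Python's body[index+1] lookahead
def hvrlLoop : List Char → Bool → Bool → Bool → Bool
  | [], sawDigit, _, prevDigit => sawDigit && prevDigit
  | c :: rest, sawDigit, sawDecimal, prevDigit =>
    if isValidRadixDigit c then hvrlLoop rest true sawDecimal true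
    else if c = '_' then
      if !prevDigit || !(match rest with | d :: _ => isValidRadixDigit d | [] => false) then false
      else hvrlLoop rest sawDigit sawDecimal false
    else if c = '.' then
      if sawDecimal || !prevDigit || !(match rest with | d :: _ => isValidRadixDigit d | [] => false) then false
      else hvrlLoop rest sawDigit true false
    else false

def has_valid_radix_literal (raw : String) : Bool :=
  let body : List Char := if raw.toList.isEmpty then [] else PySem.List.slice raw.toList (some 1) none
  match body with
  | [] => false
  | b0 :: btail =>
    if b0 = '+' || b0 = '-' then
      match btail with
      | [] => false                      -- index (=1) >= len(body)
      | _ => hvrlLoop btail false false false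
    else hvrlLoop (b0 :: btail) false false false

-- ===== PORT B =====
def has_valid_radix_literal_alt (raw : String) : Bool :=
  let body : List Char := PySem.List.slice raw.toList (some 1) none
  match body with
  | [] => false
  | b0 :: btail =>
    let rest := if b0 = '+' || b0 = '-' then btail else b0 :: btail
    if rest.isEmpty then false
    else
      let parts := PySem.Chars.splitOn rest ['.']
      if parts.length > 2 then false
      else parts.all (fun part =>
        (PySem.Chars.splitOn part ['_']).all (fun g => !g.isEmpty && g.all isValidRadixDigit))

-- ===== PRECONDITION & SPEC =====
def Spec_has_valid_radix_literal (raw : String) (out : Bool) : Prop := out = has_valid_radix_literal_alt raw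
instance (raw : String) (out : Bool) : Decidable (Spec_has_valid_radix_literal raw out) := by unfold Spec_has_valid_radix_literal; infer_instance

-- ===== CLAIM (what is proved, stated in full; the proofs are below) =====
def Claim_equal_has_valid_radix_literal : Prop := ∀ (raw : String), Dom_has_valid_radix_literal raw → Spec_has_valid_radix_literal raw (has_valid_radix_literal raw)

-- ===== LEMMAS AND PROOFS =====

-- a plain recursive single-separator split, equal to PySem.Chars.splitOn with a one-char sep
def mySplit (u : Char) : List Char → List (List Char)
  | [] => [[]]
  | c :: r => if c = u then [] :: mySplit u r else (mySplit u r).modifyHead (c :: ·)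

theorem mySplit_ne_nil (u : Char) (l : List Char) : mySplit u l ≠ [] := by
  cases l with
  | nil => simp [mySplit]
  | cons c r =>
    simp only [mySplit]
    split
    · simp
    · cases h : mySplit u r with
      | nil => exact absurd h (mySplit_ne_nil u r)
      | cons a as => simp

theorem splitOn_go_spec (u : Char) :
    ∀ fuel l cur acc, l.length < fuel →
      PySem.Chars.splitOn.go [u] fuel l cur acc =
        acc.reverse ++ (mySplit u l).modifyHead (cur.reverse ++ ·) := by
  intro fuel
  induction fuel with
  | zero => intro l cur acc h; omega
  | succ f ih =>
    intro l cur acc h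
    cases l with
    | nil =>
      simp [PySem.Chars.splitOn.go, mySplit]
    | cons c r =>
      rw [PySem.Chars.splitOn.go]
      by_cases hc : c = u
      · subst hc
        have hpre : List.isPrefixOf [c] (c :: r) = true := by simp [List.isPrefixOf]
        simp only [hpre, if_pos, List.length_cons, List.drop_succ_cons, List.length_nil, List.drop_zero]
        rw [ih r [] (cur.reverse :: acc) (by simpa using Nat.lt_of_succ_lt_succ h)]
        cases hr : mySplit c r with
        | nil => exact absurd hr (mySplit_ne_nil c r)
        | cons a as => simp [mySplit, hr]
      · have hpre : List.isPrefixOf [u] (c :: r) = false := by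
          simp [List.isPrefixOf]; intro hh; exact absurd hh.symm hc
        simp only [hpre, Bool.false_eq_true, if_false]
        rw [ih r (c :: cur) acc (by simpa using Nat.lt_of_succ_lt_succ h)]
        cases hr : mySplit u r with
        | nil => exact absurd hr (mySplit_ne_nil u r)
        | cons a as => simp [mySplit, hc, hr]

theorem splitOn_eq_mySplit (u : Char) (l : List Char) :
    PySem.Chars.splitOn l [u] = mySplit u l := by
  rw [PySem.Chars.splitOn, splitOn_go_spec u (l.length + 1) l [] [] (by omega)]
  cases hr : mySplit u l with
  | nil => exact absurd hr (mySplit_ne_nil u l)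
  | cons a as => simp

-- group predicates on B's side
def goodG (g : List Char) : Bool := !g.isEmpty && g.all isValidRadixDigit
def goodP (p : List Char) : Bool := (mySplit '_' p).all goodG
def contU (l : List Char) : Bool :=
  match mySplit '_' l with
  | g :: gs => g.all isValidRadixDigit && gs.all goodG
  | [] => false

theorem mySplit_cons_ne (u c : Char) (r : List Char) (h : c ≠ u) :
    mySplit u (c :: r) = (mySplit u r).modifyHead (c :: ·) := by simp [mySplit, h]

theorem mySplit_cons_eq (u : Char) (r : List Char) :
    mySplit u (u :: r) = [] :: mySplit u r := by simp [mySplit]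

theorem mySplit_dest (u : Char) (l : List Char) : ∃ q qs, mySplit u l = q :: qs := by
  cases h : mySplit u l with
  | nil => exact absurd h (mySplit_ne_nil u l)
  | cons a as => exact ⟨a, as, rfl⟩

theorem contU_nil : contU [] = true := by simp [contU, mySplit]

theorem contU_cons_ne (c : Char) (q : List Char) (hc : c ≠ '_') :
    contU (c :: q) = (isValidRadixDigit c && contU q) := by
  obtain ⟨a, as, hr⟩ := mySplit_dest '_' q
  simp [contU, mySplit, hc, hr, Bool.and_assoc]

theorem contU_cons_us (q : List Char) : contU ('_' :: q) = goodP q := by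
  obtain ⟨a, as, hr⟩ := mySplit_dest '_' q
  simp [contU, goodP, mySplit, hr]

theorem goodP_nil : goodP [] = false := by simp [goodP, mySplit, goodG]

theorem goodP_cons (c : Char) (q : List Char) :
    goodP (c :: q) = if c = '_' then false else (isValidRadixDigit c && contU q) := by
  by_cases hc : c = '_'
  · subst hc
    obtain ⟨a, as, hr⟩ := mySplit_dest '_' q
    simp [goodP, mySplit, hr, goodG]
  · obtain ⟨a, as, hr⟩ := mySplit_dest '_' q
    simp [goodP, mySplit, hc, hr, goodG, contU, Bool.and_assoc]

theorem digit_ne_us {c : Char} (h : isValidRadixDigit c = true) : c ≠ '_' := by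
  intro hh; subst hh; exact absurd h (by decide)
theorem digit_ne_dot {c : Char} (h : isValidRadixDigit c = true) : c ≠ '.' := by
  intro hh; subst hh; exact absurd h (by decide)

-- the characterization of A's loop entered right after a digit, against the split structure
def dotSpec (d : Bool) (l : List Char) : Bool :=
  match mySplit '.' l with
  | [p] => contU p
  | [p1, p2] => !d && contU p1 && goodP p2
  | _ => false

theorem dotSpec_of_one (d : Bool) {l p : List Char} (h : mySplit '.' l = [p]) :
    dotSpec d l = contU p := by simp [dotSpec, h]
theorem dotSpec_of_two (d : Bool) {l p1 p2 : List Char} (h : mySplit '.' l = [p1, p2]) :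
    dotSpec d l = (!d && contU p1 && goodP p2) := by simp [dotSpec, h]
theorem dotSpec_of_many (d : Bool) {l p1 p2 p3 : List Char} {ps : List (List Char)}
    (h : mySplit '.' l = p1 :: p2 :: p3 :: ps) : dotSpec d l = false := by simp [dotSpec, h]

theorem loop_after_digit (n : Nat) :
    ∀ l : List Char, l.length ≤ n → ∀ d : Bool, hvrlLoop l true d true = dotSpec d l := by
  induction n with
  | zero =>
    intro l hl d
    have : l = [] := List.eq_nil_of_length_eq_zero (Nat.le_zero.mp hl)
    subst this
    simp [hvrlLoop, dotSpec, mySplit, contU_nil]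
  | succ n ih =>
    intro l hl d
    cases l with
    | nil => simp [hvrlLoop, dotSpec, mySplit, contU_nil]
    | cons c r =>
      have hr' : r.length ≤ n := by simpa using Nat.le_of_succ_le_succ hl
      by_cases hdig : isValidRadixDigit c = true
      · -- digit branch
        have hcu : c ≠ '_' := digit_ne_us hdig
        have hcd : c ≠ '.' := digit_ne_dot hdig
        obtain ⟨q, qs, hsp⟩ := mySplit_dest '.' r
        have hfull : mySplit '.' (c :: r) = (c :: q) :: qs := by
          rw [mySplit_cons_ne '.' c r hcd, hsp]; rfl
        rw [show hvrlLoop (c :: r) true d true = hvrlLoop r true d true by simp [hvrlLoop, hdig],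
            ih r hr' d]
        cases qs with
        | nil =>
          rw [dotSpec_of_one d hsp, dotSpec_of_one d hfull, contU_cons_ne c q hcu]
          simp [hdig]
        | cons q2 qs2 =>
          cases qs2 with
          | nil =>
            rw [dotSpec_of_two d hsp, dotSpec_of_two d hfull, contU_cons_ne c q hcu]
            simp [hdig, Bool.and_assoc, Bool.and_left_comm]
          | cons q3 ps =>
            rw [dotSpec_of_many d hsp, dotSpec_of_many d hfull]
      · by_cases hus : c = '_'
        · subst hus
          -- underscore: requires prev digit (true in this state) and a digit right after
          cases r with
          | nil =>
            rw [show hvrlLoop ['_'] true d true = false by simp [hvrlLoop, hdig]]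
            rw [dotSpec_of_one d (l := ['_']) (p := ['_']) (by simp [mySplit]),
                contU_cons_us, goodP_nil]
          | cons e r' =>
            have hr'' : r'.length ≤ n := by simp at hl; omega
            by_cases he : isValidRadixDigit e = true
            · have heu : e ≠ '_' := digit_ne_us he
              have hed : e ≠ '.' := digit_ne_dot he
              obtain ⟨q, qs, hsp⟩ := mySplit_dest '.' r'
              have hmid : mySplit '.' (e :: r') = (e :: q) :: qs := by
                rw [mySplit_cons_ne '.' e r' hed, hsp]; rfl
              have hfull : mySplit '.' ('_' :: e :: r') = ('_' :: e :: q) :: qs := by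
                rw [mySplit_cons_ne '.' '_' (e :: r') (by decide), hmid]; rfl
              rw [show hvrlLoop ('_' :: e :: r') true d true = hvrlLoop (e :: r') true d false by
                    simp [hvrlLoop, hdig, he],
                  show hvrlLoop (e :: r') true d false = hvrlLoop r' true d true by
                    simp [hvrlLoop, he],
                  ih r' hr'' d]
              cases qs with
              | nil =>
                rw [dotSpec_of_one d hsp, dotSpec_of_one d hfull, contU_cons_us, goodP_cons]
                simp [heu, he]
              | cons q2 qs2 =>
                cases qs2 with
                | nil =>
                  rw [dotSpec_of_two d hsp, dotSpec_of_two d hfull, contU_cons_us, goodP_cons]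
                  simp [heu, he, Bool.and_assoc, Bool.and_left_comm]
                | cons q3 ps =>
                  rw [dotSpec_of_many d hsp, dotSpec_of_many d hfull]
            · -- '_' not followed by a digit: A rejects; for B the enclosing group is bad
              rw [show hvrlLoop ('_' :: e :: r') true d true = false by simp [hvrlLoop, hdig, he]]
              obtain ⟨p, ps, hsp⟩ := mySplit_dest '.' (e :: r')
              have hfull : mySplit '.' ('_' :: e :: r') = ('_' :: p) :: ps := by
                rw [mySplit_cons_ne '.' '_' (e :: r') (by decide), hsp]; rfl
              have hbad : contU ('_' :: p) = false := by
                rw [contU_cons_us]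
                by_cases hed : e = '.'
                · subst hed
                  rw [mySplit_cons_eq '.' r'] at hsp
                  have hp : p = [] := by
                    injection hsp with h1 _
                    exact h1.symm
                  rw [hp, goodP_nil]
                · obtain ⟨a, as, hsp2⟩ := mySplit_dest '.' r'
                  rw [mySplit_cons_ne '.' e r' hed, hsp2] at hsp
                  have hp : p = e :: a := by
                    injection hsp with h1 _
                    exact h1.symm
                  rw [hp, goodP_cons]
                  split
                  · rfl
                  · simp [he]
              cases ps with
              | nil => rw [dotSpec_of_one d hfull, hbad]
              | cons p2 ps2 =>
                cases ps2 with
                | nil => rw [dotSpec_of_two d hfull, hbad]; simp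
                | cons p3 ps3 => rw [dotSpec_of_many d hfull]
        · by_cases hdot : c = '.'
          · subst hdot
            obtain ⟨q, qs, hsp⟩ := mySplit_dest '.' r
            have hfull : mySplit '.' ('.' :: r) = [] :: q :: qs := by
              rw [mySplit_cons_eq '.' r, hsp]
            by_cases hd : d = true
            · subst hd
              rw [show hvrlLoop ('.' :: r) true true true = false by simp [hvrlLoop, hdig]]
              cases qs with
              | nil => rw [dotSpec_of_two true hfull]; simp
              | cons q2 qs2 => rw [dotSpec_of_many true hfull]
            · have hd0 : d = false := by simpa using hd
              subst hd0
              cases r with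
              | nil =>
                rw [show hvrlLoop ['.'] true false true = false by simp [hvrlLoop, hdig]]
                rw [dotSpec_of_two false (l := ['.']) (p1 := []) (p2 := [])
                      (by simp [mySplit]), goodP_nil]
                simp
              | cons e r' =>
                have hr'' : r'.length ≤ n := by simp at hl; omega
                by_cases he : isValidRadixDigit e = true
                · have heu : e ≠ '_' := digit_ne_us he
                  have hed : e ≠ '.' := digit_ne_dot he
                  obtain ⟨q', qs', hsp'⟩ := mySplit_dest '.' r'
                  have hmid : mySplit '.' (e :: r') = (e :: q') :: qs' := by
                    rw [mySplit_cons_ne '.' e r' hed, hsp']; rfl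
                  have hfull' : mySplit '.' ('.' :: e :: r') = [] :: (e :: q') :: qs' := by
                    rw [mySplit_cons_eq '.' (e :: r'), hmid]
                  rw [show hvrlLoop ('.' :: e :: r') true false true
                        = hvrlLoop (e :: r') true true false by simp [hvrlLoop, hdig, he],
                      show hvrlLoop (e :: r') true true false = hvrlLoop r' true true true by
                        simp [hvrlLoop, he],
                      ih r' hr'' true]
                  cases qs' with
                  | nil =>
                    rw [dotSpec_of_one true hsp', dotSpec_of_two false hfull', contU_nil,
                        goodP_cons]
                    simp [heu, he]
                  | cons q2 qs2 =>
                    rw [dotSpec_of_many false hfull']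
                    cases qs2 with
                    | nil => rw [dotSpec_of_two true hsp']; simp
                    | cons q3 ps => rw [dotSpec_of_many true hsp']
                · -- '.' not followed by a digit
                  rw [show hvrlLoop ('.' :: e :: r') true false true = false by
                        simp [hvrlLoop, hdig, he]]
                  obtain ⟨p, ps, hsp2⟩ := mySplit_dest '.' (e :: r')
                  have hfull' : mySplit '.' ('.' :: e :: r') = [] :: p :: ps := by
                    rw [mySplit_cons_eq '.' (e :: r'), hsp2]
                  have hbad : goodP p = false := by
                    by_cases hed : e = '.'
                    · subst hed
                      rw [mySplit_cons_eq '.' r'] at hsp2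
                      have hp : p = [] := by injection hsp2 with h1 _; exact h1.symm
                      rw [hp, goodP_nil]
                    · obtain ⟨a, as, hsp3⟩ := mySplit_dest '.' r'
                      rw [mySplit_cons_ne '.' e r' hed, hsp3] at hsp2
                      have hp : p = e :: a := by injection hsp2 with h1 _; exact h1.symm
                      rw [hp, goodP_cons]
                      split
                      · rfl
                      · simp [he]
                  cases ps with
                  | nil => rw [dotSpec_of_two false hfull', hbad]; simp
                  | cons p2 ps2 => rw [dotSpec_of_many false hfull']
          · -- invalid character: both sides reject
            rw [show hvrlLoop (c :: r) true d true = false by simp [hvrlLoop, hdig, hus, hdot]]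
            obtain ⟨q, qs, hsp⟩ := mySplit_dest '.' r
            have hfull : mySplit '.' (c :: r) = (c :: q) :: qs := by
              rw [mySplit_cons_ne '.' c r hdot, hsp]; rfl
            have hbad : contU (c :: q) = false := by
              rw [contU_cons_ne c q hus]; simp [hdig]
            cases qs with
            | nil => rw [dotSpec_of_one d hfull, hbad]
            | cons q2 qs2 =>
              cases qs2 with
              | nil => rw [dotSpec_of_two d hfull, hbad]; simp
              | cons q3 ps => rw [dotSpec_of_many d hfull]

-- A's full loop over a nonempty rest equals B's two-level split check
theorem loop_eq_split (c : Char) (r : List Char) :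
    hvrlLoop (c :: r) false false false =
      (let parts := PySem.Chars.splitOn (c :: r) ['.']
       if parts.length > 2 then false
       else parts.all (fun part =>
         (PySem.Chars.splitOn part ['_']).all (fun g => !g.isEmpty && g.all isValidRadixDigit))) := by
  have hstep : hvrlLoop (c :: r) false false false =
      (isValidRadixDigit c && hvrlLoop r true false true) := by
    by_cases hdig : isValidRadixDigit c = true
    · simp [hvrlLoop, hdig]
    · simp [hvrlLoop, hdig]
  rw [hstep, loop_after_digit r.length r (le_refl _) false]
  simp only [splitOn_eq_mySplit]
  have hall : ∀ p : List Char,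
      (mySplit '_' p).all (fun g => !g.isEmpty && g.all isValidRadixDigit) = goodP p :=
    fun p => rfl
  by_cases hdot : c = '.'
  · subst hdot
    have hdig : isValidRadixDigit '.' = false := by decide
    obtain ⟨q, qs, hsp⟩ := mySplit_dest '.' r
    have hfull : mySplit '.' ('.' :: r) = [] :: q :: qs := by rw [mySplit_cons_eq '.' r, hsp]
    simp only [hfull, hdig]
    cases qs with
    | nil => simp [hall, goodP_nil]
    | cons _ _ => simp
  · obtain ⟨q, qs, hsp⟩ := mySplit_dest '.' r
    have hfull : mySplit '.' (c :: r) = (c :: q) :: qs := by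
      rw [mySplit_cons_ne '.' c r hdot, hsp]; rfl
    by_cases hus : c = '_'
    · subst hus
      have hdig : isValidRadixDigit '_' = false := by decide
      simp only [hfull, hdig]
      cases qs with
      | nil => simp [hall, goodP_cons]
      | cons q2 qs2 =>
        cases qs2 with
        | nil => simp [hall, goodP_cons]
        | cons _ _ => simp
    · have hgp : goodP (c :: q) = (isValidRadixDigit c && contU q) := by
        rw [goodP_cons]; simp [hus]
      simp only [hfull]
      cases qs with
      | nil =>
        rw [dotSpec_of_one false hsp]
        simp [hall, hgp]
      | cons q2 qs2 =>
        cases qs2 with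
        | nil =>
          rw [dotSpec_of_two false hsp]
          simp [hall, hgp, Bool.and_assoc]
        | cons _ _ =>
          rw [dotSpec_of_many false hsp]
          simp

-- ===== VERDICT (by name: the statement is the Claim_ definition above) =====
theorem has_valid_radix_literal_spec : Claim_equal_has_valid_radix_literal := by
  intro raw _
  unfold Spec_has_valid_radix_literal has_valid_radix_literal has_valid_radix_literal_alt
  cases hraw : raw.toList with
  | nil => simp [PySem.List.slice_from_one]
  | cons c cs =>
    simp only [List.isEmpty_cons, PySem.List.slice_from_one, List.tail_cons, if_false,
               Bool.false_eq_true]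
    cases cs with
    | nil => simp
    | cons b0 btail =>
      by_cases hsign : (b0 = '+' || b0 = '-') = true
      · simp only [hsign, if_pos]
        cases btail with
        | nil => simp
        | cons e r => simp [loop_eq_split e r]
      · simp only [Bool.not_eq_true] at hsign
        simp only [hsign, Bool.false_eq_true, if_false, List.isEmpty_cons]
        simp [loop_eq_split b0 btail]
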